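-- pv_equiv track=rewrite | github.com/AkCodes23/JARVIS | doctor.py | identify_action_items
-- ===== SOURCE A (Python) =====
-- def identify_action_items(text, extracted_terms):
--     """Identify action items based on the conversation."""
--     actions = []
--     text_lower = text.lower()
--
--     # Medication-related actions
--     if "medications" in extracted_terms:
--         actions.append("Review current medications")
--         actions.append("Check for potential drug interactions")
--         actions.append("Consider medication adjustments if needed")
--
--     # Symptom-related actions
--     if "symptoms" in extracted_terms:
--         actions.append("Document symptom severity and duration")
--         if "pain" in text_lower:
--             actions.append("Assess pain management options")
--             actions.append("Consider pain scale assessment")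
--
--     # Vital signs actions
--     if "vital_signs" in extracted_terms:
--         actions.append("Record current vital signs")
--         actions.append("Compare with previous readings")
--         actions.append("Monitor trends in vital signs")
--
--     # Diagnostic actions
--     if any(category in extracted_terms for category in ["symptoms", "risk_factors"]):
--         actions.append("Consider additional diagnostic tests")
--         actions.append("Review medical history")
--         actions.append("Assess risk factors")
--
--     return actions
-- ===== SOURCE B (Python) =====
-- # B: normalize-then-select — first derive a set of trigger flags from the input,
-- # then select actions from a flat per-action table keyed by trigger.
-- ACTION_TABLE = [
--     ("medications", "Review current medications"),
--     ("medications", "Check for potential drug interactions"),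
--     ("medications", "Consider medication adjustments if needed"),
--     ("symptoms", "Document symptom severity and duration"),
--     ("pain", "Assess pain management options"),
--     ("pain", "Consider pain scale assessment"),
--     ("vital_signs", "Record current vital signs"),
--     ("vital_signs", "Compare with previous readings"),
--     ("vital_signs", "Monitor trends in vital signs"),
--     ("diagnostic", "Consider additional diagnostic tests"),
--     ("diagnostic", "Review medical history"),
--     ("diagnostic", "Assess risk factors"),
-- ]
--
-- def identify_action_items(text, extracted_terms):
--     # stage 1: normalize the input into a set of trigger flags
--     triggers = {c for c in ("medications", "symptoms", "vital_signs", "risk_factors")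
--                 if c in extracted_terms}
--     if "symptoms" in triggers and "pain" in text.lower():
--         triggers.add("pain")
--     if triggers & {"symptoms", "risk_factors"}:
--         triggers.add("diagnostic")
--     # stage 2: one flat per-action selection pass
--     return [action for trig, action in ACTION_TABLE if trig in triggers]
-- ===== Notes on version B (the rewrite author's own statement) =====
-- stated objective: alternative
-- what changed: B replaces A's inline if-cascade with a two-stage normalize-then-select pass: it first derives a set of trigger flags (including the combined pain and diagnostic flags) from the input, then selects actions in one scan of a flat per-action (trigger, action) table.
import Mathlib
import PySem

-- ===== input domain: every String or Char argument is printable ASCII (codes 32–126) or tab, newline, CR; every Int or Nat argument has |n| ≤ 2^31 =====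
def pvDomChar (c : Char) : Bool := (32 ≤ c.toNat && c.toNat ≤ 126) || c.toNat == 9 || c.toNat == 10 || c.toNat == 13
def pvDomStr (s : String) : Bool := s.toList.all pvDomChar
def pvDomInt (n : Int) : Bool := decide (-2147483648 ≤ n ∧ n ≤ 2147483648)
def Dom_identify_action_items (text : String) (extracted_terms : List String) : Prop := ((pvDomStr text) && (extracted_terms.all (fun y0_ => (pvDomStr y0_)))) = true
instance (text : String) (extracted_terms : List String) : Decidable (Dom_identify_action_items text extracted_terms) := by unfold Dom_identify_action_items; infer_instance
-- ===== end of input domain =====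

-- B normalizes the input into a set of trigger flags first, then selects actions
-- from a flat per-action table in one pass (objective: alternative decomposition).

-- ===== PORT A =====
def identify_action_items (text : String) (extracted_terms : List String) : List String :=
  let actions : List String := []
  let text_lower := PySem.Str.lower text
  let actions := if extracted_terms.contains "medications" then
      actions ++ ["Review current medications", "Check for potential drug interactions",
                  "Consider medication adjustments if needed"]
    else actions
  let actions := if extracted_terms.contains "symptoms" then
      let actions := actions ++ ["Document symptom severity and duration"]
      if PySem.Str.isIn "pain" text_lower then
        actions ++ ["Assess pain management options", "Consider pain scale assessment"]
      else actions
    else actions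
  let actions := if extracted_terms.contains "vital_signs" then
      actions ++ ["Record current vital signs", "Compare with previous readings",
                  "Monitor trends in vital signs"]
    else actions
  let actions := if (["symptoms", "risk_factors"].any (fun category => extracted_terms.contains category)) then
      actions ++ ["Consider additional diagnostic tests", "Review medical history",
                  "Assess risk factors"]
    else actions
  actions

-- ===== PORT B =====
-- flat per-action table: (trigger flag, action)
def pvActionTable : List (String × String) :=
  [ ("medications", "Review current medications"),
    ("medications", "Check for potential drug interactions"),
    ("medications", "Consider medication adjustments if needed"),
    ("symptoms", "Document symptom severity and duration"),
    ("pain", "Assess pain management options"),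
    ("pain", "Consider pain scale assessment"),
    ("vital_signs", "Record current vital signs"),
    ("vital_signs", "Compare with previous readings"),
    ("vital_signs", "Monitor trends in vital signs"),
    ("diagnostic", "Consider additional diagnostic tests"),
    ("diagnostic", "Review medical history"),
    ("diagnostic", "Assess risk factors") ]

def identify_action_items_alt (text : String) (extracted_terms : List String) : List String :=
  -- stage 1: derive the trigger set
  let triggers : PySem.Set String :=
    PySem.Set.ofList ((["medications", "symptoms", "vital_signs", "risk_factors"] : List String).filter
      (fun c => extracted_terms.contains c))
  let triggers := if PySem.Set.contains triggers "symptoms" && PySem.Str.isIn "pain" (PySem.Str.lower text) then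
      PySem.Set.add triggers "pain" else triggers
  let triggers := if ¬ (PySem.Set.inter triggers (PySem.Set.ofList ["symptoms", "risk_factors"])).isEmpty then
      PySem.Set.add triggers "diagnostic" else triggers
  -- stage 2: select actions whose trigger fired
  pvActionTable.filterMap (fun ta => if PySem.Set.contains triggers ta.1 then some ta.2 else none)

-- ===== PRECONDITION & SPEC =====
def Spec_identify_action_items (text : String) (extracted_terms : List String) (out : List String) : Prop := out = identify_action_items_alt text extracted_terms
instance (text : String) (extracted_terms : List String) (out : List String) : Decidable (Spec_identify_action_items text extracted_terms out) := by unfold Spec_identify_action_items; infer_instance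

-- ===== CLAIM (what is proved, stated in full; the proofs are below) =====
def Claim_equal_identify_action_items : Prop := ∀ (text : String) (extracted_terms : List String), Dom_identify_action_items text extracted_terms → Spec_identify_action_items text extracted_terms (identify_action_items text extracted_terms)

-- ===== LEMMAS AND PROOFS =====
-- both sides depend on the input only through these five booleans
theorem pv_abstract (m s v r p : Bool) (text : String) (extracted_terms : List String)
    (hm : extracted_terms.contains "medications" = m)
    (hs : extracted_terms.contains "symptoms" = s)
    (hv : extracted_terms.contains "vital_signs" = v)
    (hr : extracted_terms.contains "risk_factors" = r)
    (hp : PySem.Str.isIn "pain" (PySem.Str.lower text) = p) :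
    identify_action_items text extracted_terms = identify_action_items_alt text extracted_terms := by
  unfold identify_action_items identify_action_items_alt pvActionTable
  simp only [List.filter, List.any, hm, hs, hv, hr, hp]
  cases m <;> cases s <;> cases v <;> cases r <;> cases p <;> rfl

-- ===== VERDICT (by name: the statement is the Claim_ definition above) =====
theorem identify_action_items_spec : Claim_equal_identify_action_items := by
  intro text extracted_terms _
  exact (pv_abstract _ _ _ _ _ text extracted_terms rfl rfl rfl rfl rfl).symm ▸ rfl
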